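-- pv_equiv track=rewrite | github.com/evtn/soda | soda/paths.py | compact_path
-- ===== SOURCE A (Python) =====
-- def compact_path(path: list[str]) -> str:
--     result: list[str] = []
--     digits = set("0123456789")
--
--     for part in path:
--         if not result:
--             result.append(part)
--             continue
--
--         if part.isalpha():
--             result.append(part)
--             continue
--
--         is_negative = part[0] == "-"
--
--         part = part.lstrip("-").lstrip("0")
--
--         if not part:
--             is_negative = False
--             part = "0"
--
--         if is_negative:
--             result.append("-")
--             result.append(part)
--             continue
--
--         is_dot = part[0] == "."
--
--         if is_dot:
--             if "." not in result[-1]: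
--                 result.append(" ")
--         elif result[-1][-1] in digits:
--             result.append(" ")
--
--         result.append(part)
--
--     return "".join(result)
-- ===== SOURCE B (Python) =====
-- def compact_path(path: list[str]) -> str:
--     DIGITS = "0123456789"
--
--     def token(part):
--         # normalize one (non-first) part into (kind, text)
--         if part.isalpha():
--             return ("cmd", part)
--         body = part.lstrip("-").lstrip("0")
--         if not body:
--             return ("num", "0")
--         if part[0] == "-":
--             return ("neg", "-" + body)
--         if body[0] == ".":
--             return ("dot", body)
--         return ("num", body)
--
--     def sep(prev, kind):
--         # separator needed before a token, given the previous token's text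
--         if kind == "dot":
--             return "" if "." in prev else " "
--         if kind == "num":
--             return " " if prev[-1:] in DIGITS else ""
--         return ""  # commands and negatives carry their own separator
--
--     if not path:
--         return ""
--     toks = [("cmd", path[0])] + [token(p) for p in path[1:]]
--     return path[0] + "".join(
--         sep(prev, kind) + text for (_, prev), (kind, text) in zip(toks, toks[1:])
--     )
-- ===== Notes on version B (the rewrite author's own statement) =====
-- stated objective: alternative
-- what changed: B replaces A's single loop over a mutable result list (whose separator logic peeks at result[-1]) by two pure passes: each part is first normalized independently into a (category, text) token, then the tokens are joined by zipping each token with its predecessor to compute the separator.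
import Mathlib
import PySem

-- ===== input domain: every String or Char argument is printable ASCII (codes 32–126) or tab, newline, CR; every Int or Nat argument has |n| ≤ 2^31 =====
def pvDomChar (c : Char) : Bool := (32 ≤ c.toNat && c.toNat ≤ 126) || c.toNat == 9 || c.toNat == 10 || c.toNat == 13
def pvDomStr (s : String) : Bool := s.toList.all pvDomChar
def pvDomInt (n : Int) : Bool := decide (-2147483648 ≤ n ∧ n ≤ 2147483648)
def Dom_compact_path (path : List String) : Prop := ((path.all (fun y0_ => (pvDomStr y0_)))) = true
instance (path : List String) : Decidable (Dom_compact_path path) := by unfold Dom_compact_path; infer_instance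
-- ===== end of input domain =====

-- B compacts the path in two pure passes (tokenize each part with its category, then join with
-- pairwise separators) instead of A's single loop over a mutable result list; objective: alternative.

-- ===== PORT A =====
-- str.lstrip(chars): drop leading characters belonging to the set `chars` (exact; PySem has only the two-sided stripChars)
def pvLstrip (s : List Char) (chars : List Char) : List Char :=
  s.dropWhile (fun c => chars.contains c)

-- digits = set("0123456789")
def pvDigits : PySem.Set Char := PySem.Set.ofList "0123456789".toList

-- the body of A's `for part in path` loop, acting on `result`
def pvStepA (result : List (List Char)) (part : List Char) : List (List Char) :=
  if result.isEmpty then result ++ [part]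
  else if PySem.Chars.strIsalpha part then result ++ [part]
  else
    let isNeg0 := PySem.List.pyGetD part 0 ' ' == '-'   -- part[0] == "-" (raises on an empty part: outside Pre_)
    let part1 := pvLstrip (pvLstrip part ['-']) ['0']
    let isNeg := if part1.isEmpty then false else isNeg0
    let part2 := if part1.isEmpty then ['0'] else part1
    if isNeg then (result ++ [['-']]) ++ [part2]
    else
      let isDot := PySem.List.pyGetD part2 0 ' ' == '.'
      let result1 :=
        if isDot then
          if PySem.Chars.isIn ['.'] (PySem.List.pyGetD result (-1) []) then result
          else result ++ [[' ']]
        else if PySem.Set.contains pvDigits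
                  (PySem.List.pyGetD (PySem.List.pyGetD result (-1) []) (-1) ' ') then
          result ++ [[' ']]
        else result
      result1 ++ [part2]

def compact_path (path : List String) : String :=
  String.ofList (PySem.Chars.join [] ((path.map String.toList).foldl pvStepA []))

-- ===== PORT B =====
inductive PvKind | cmd | neg | dot | num
deriving DecidableEq, Repr

-- Source B's token(part)
def pvToken (part : List Char) : PvKind × List Char :=
  if PySem.Chars.strIsalpha part then (PvKind.cmd, part)
  else
    let body := pvLstrip (pvLstrip part ['-']) ['0']
    if body.isEmpty then (PvKind.num, ['0'])
    else if PySem.List.pyGetD part 0 ' ' == '-' then (PvKind.neg, '-' :: body)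
    else if PySem.List.pyGetD body 0 ' ' == '.' then (PvKind.dot, body)
    else (PvKind.num, body)

-- Source B's sep(prev, kind)
def pvSep (prev : List Char) (kind : PvKind) : List Char :=
  match kind with
  | PvKind.dot => if PySem.Chars.isIn ['.'] prev then [] else [' ']
  | PvKind.num =>
      if PySem.Chars.isIn (PySem.Chars.slice prev (some (-1)) none) "0123456789".toList
      then [' '] else []
  | _ => []

def compact_path_alt (path : List String) : String :=
  match path with
  | [] => ""
  | p :: rest =>
    let toks := (PvKind.cmd, p.toList) :: rest.map (fun q => pvToken q.toList)
    String.ofList (p.toList ++ PySem.Chars.join []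
        ((toks.zip toks.tail).map (fun pr => pvSep pr.1.2 pr.2.1 ++ pr.2.2)))

-- ===== PRECONDITION & SPEC =====
-- Pre_ excludes exactly the inputs on which A raises IndexError: a list with an empty part
-- after the first, or with an empty first part followed by a digit-leading number part.
-- pvNumLead: the part is tokenized as a bare number (not a command, not negative, not dot-leading)
def pvNumLead (p : List Char) : Bool :=
  !PySem.Chars.strIsalpha p &&
  ((pvLstrip (pvLstrip p ['-']) ['0']).isEmpty ||
   (!(p.headD ' ' == '-') && !((pvLstrip (pvLstrip p ['-']) ['0']).headD ' ' == '.')))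

def Pre_compact_path (path : List String) : Prop :=
  "" ∉ path.tail ∧ (path.headD "x" = "" → pvNumLead ((path.getD 1 "x").toList) = false)
instance (path : List String) : Decidable (Pre_compact_path path) := by
  unfold Pre_compact_path; infer_instance

def pvWitness_compact_path : List String := ["M", "-007", "0.5", "-.5", "L", "12"]

def Spec_compact_path (path : List String) (out : String) : Prop := out = compact_path_alt path
instance (path : List String) (out : String) : Decidable (Spec_compact_path path out) := by
  unfold Spec_compact_path; infer_instance

-- ===== CLAIM (what is proved, stated in full; the proofs are below) =====
def Claim_equal_compact_path : Prop := ∀ (path : List String), Dom_compact_path path → Pre_compact_path path → Spec_compact_path path (compact_path path)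


-- ===== LEMMAS AND PROOFS =====

-- "".join(parts) is concatenation
lemma pvJoinNil (xs : List (List Char)) : PySem.Chars.join [] xs = xs.flatten := by
  unfold PySem.Chars.join List.intercalate
  induction xs with
  | nil => rfl
  | cons a l ih => cases l <;> simp_all [List.intersperse]

lemma pvSingletonInfix (a : Char) (l : List Char) : [a] <:+: l ↔ a ∈ l := by
  constructor
  · intro h; exact h.mem (by simp)
  · intro h; obtain ⟨s, t, rfl⟩ := List.append_of_mem h; exact ⟨s, t, by simp⟩

-- prev[-1:] of a nonempty list is [last element]
lemma pvSliceLast (cs : List Char) (h : cs ≠ []) :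
    PySem.Chars.slice cs (some (-1)) none = [cs.getLast h] := by
  have hpos : 0 < cs.length := List.length_pos_iff.mpr h
  have hn : cs.length - 1 < cs.length := by omega
  have hd : cs.drop (cs.length - 1) = [cs.getLast h] := by
    rw [List.drop_eq_getElem_cons hn, List.drop_eq_nil_of_le (by omega),
        List.getLast_eq_getElem]
  rw [PySem.Chars.slice_eq_listSlice]
  simp only [PySem.List.slice, PySem.List.clampIdx]
  rw [if_pos (by norm_num : (-1 : Int) < 0), if_neg (by omega : ¬((cs.length : Int) + -1 < 0))]
  rw [show ((cs.length : Int) + -1).toNat = cs.length - 1 by omega]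
  rw [show cs.length - (cs.length - 1) = 1 by omega, hd]
  rfl

-- B's recursive emission, the bridge between A's loop and B's zip
def pvEmit (prev : List Char) (rest : List (List Char)) : List Char :=
  match rest with
  | [] => []
  | p :: ps => pvSep prev (pvToken p).1 ++ (pvToken p).2 ++ pvEmit (pvToken p).2 ps

lemma pvZipEmit (rest : List (List Char)) (k : PvKind) (prev : List Char) :
    ((((k, prev) :: rest.map pvToken).zip (rest.map pvToken)).map
        (fun pr => pvSep pr.1.2 pr.2.1 ++ pr.2.2)).flatten = pvEmit prev rest := by
  induction rest generalizing k prev with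
  | nil => rfl
  | cons p ps ih => simp [pvEmit, ih (pvToken p).1 (pvToken p).2]

-- the two dot tests agree (prev is A's last stored token, possibly with its '-' re-attached)
lemma pvDotAgree (L prev : List Char) (hprev : prev = L ∨ prev = '-' :: L) :
    PySem.Chars.isIn ['.'] L = PySem.Chars.isIn ['.'] prev := by
  rcases hprev with rfl | rfl
  · rfl
  · rw [Bool.eq_iff_iff, PySem.Chars.isIn_iff_infix, PySem.Chars.isIn_iff_infix,
        pvSingletonInfix, pvSingletonInfix, List.mem_cons]
    constructor
    · exact Or.inr
    · rintro (h | h)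
      · exact absurd h (by decide)
      · exact h

-- the two digit tests agree
lemma pvDigitAgree (L prev : List Char) (hL : L ≠ [])
    (hprev : prev = L ∨ prev = '-' :: L) :
    PySem.Set.contains pvDigits (PySem.List.pyGetD L (-1) ' ')
      = PySem.Chars.isIn (PySem.List.slice prev (some (-1)) none)
          ['0','1','2','3','4','5','6','7','8','9'] := by
  have hpne : prev ≠ [] := by
    rcases hprev with rfl | rfl
    · exact hL
    · simp
  have hplast : prev.getLast hpne = L.getLast hL := by
    rcases hprev with rfl | rfl
    · rfl
    · exact List.getLast_cons hL
  have hds : ("0123456789".toList : List Char) = ['0','1','2','3','4','5','6','7','8','9'] := by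
    decide
  rw [PySem.List.pyGetD_neg_one L ' ' hL, ← PySem.Chars.slice_eq_listSlice,
      pvSliceLast prev hpne, hplast]
  rw [Bool.eq_iff_iff, PySem.Set.contains_iff, PySem.Chars.isIn_iff_infix, pvSingletonInfix]
  unfold pvDigits
  rw [PySem.Set.mem_ofList, hds]

lemma pvMain (rest : List (List Char)) (R : List (List Char)) (prev : List Char)
    (hR : R ≠ []) (hlast : R.getLast hR ≠ [])
    (hprev : prev = R.getLast hR ∨ prev = '-' :: R.getLast hR)
    (hrest : ∀ p ∈ rest, p ≠ []) :
    (rest.foldl pvStepA R).flatten = R.flatten ++ pvEmit prev rest := by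
  induction rest generalizing R prev with
  | nil => simp [pvEmit]
  | cons p ps ih =>
    have hp : p ≠ [] := hrest p (by simp)
    have hps : ∀ q ∈ ps, q ≠ [] := fun q hq => hrest q (by simp [hq])
    have hRE : R.isEmpty = false := by
      cases R with
      | nil => exact absurd rfl hR
      | cons a l => rfl
    rw [List.foldl_cons]
    by_cases ha : PySem.Chars.strIsalpha p = true
    · -- command
      have htok : pvToken p = (PvKind.cmd, p) := by simp [pvToken, ha]
      have hstep : pvStepA R p = R ++ [p] := by simp [pvStepA, hRE, ha]
      rw [hstep, ih (R ++ [p]) p (by simp)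
            (by rw [List.getLast_concat]; exact hp)
            (Or.inl (List.getLast_concat).symm) hps]
      simp [pvEmit, htok, pvSep, List.flatten_append, List.append_assoc]
    · by_cases hb : (pvLstrip (pvLstrip p ['-']) ['0']).isEmpty = true
      · -- stripped to nothing: token "0", number rule
        have hdot : (PySem.List.pyGetD ['0'] (0 : Int) ' ' == '.') = false := by decide
        have htok : pvToken p = (PvKind.num, ['0']) := by simp [pvToken, ha, hb]
        have hAg : PySem.Set.contains pvDigits
              (PySem.List.pyGetD (PySem.List.pyGetD R (-1) []) (-1) ' ')
            = PySem.Chars.isIn (PySem.List.slice prev (some (-1)) none)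
                ['0','1','2','3','4','5','6','7','8','9'] := by
          rw [PySem.List.pyGetD_neg_one R [] hR]
          exact pvDigitAgree (R.getLast hR) prev hlast hprev
        simp only [pvStepA, hRE, Bool.false_eq_true, if_false, ha, hb, if_true, hdot, hAg]
        by_cases hc : PySem.Chars.isIn (PySem.List.slice prev (some (-1)) none)
            ['0','1','2','3','4','5','6','7','8','9'] = true
        · simp only [hc, if_true]
          rw [ih ((R ++ [[' ']]) ++ [['0']]) ['0'] (by simp)
                (by rw [List.getLast_concat]; decide)
                (Or.inl (List.getLast_concat).symm) hps]
          simp [pvEmit, htok, pvSep, hc, List.flatten_append, List.append_assoc]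
        · simp only [hc, Bool.false_eq_true, if_false]
          rw [ih (R ++ [['0']]) ['0'] (by simp)
                (by rw [List.getLast_concat]; decide)
                (Or.inl (List.getLast_concat).symm) hps]
          simp [pvEmit, htok, pvSep, hc, List.flatten_append, List.append_assoc]
      · have hbne : pvLstrip (pvLstrip p ['-']) ['0'] ≠ [] := fun e => hb (by simp [e])
        by_cases hn : (PySem.List.pyGetD p 0 ' ' == '-') = true
        · -- negative
          have htok : pvToken p = (PvKind.neg, '-' :: pvLstrip (pvLstrip p ['-']) ['0']) := by
            simp [pvToken, ha, hb, hn]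
          have hstep : pvStepA R p = (R ++ [['-']]) ++ [pvLstrip (pvLstrip p ['-']) ['0']] := by
            simp [pvStepA, hRE, ha, hb, hn]
          rw [hstep, ih ((R ++ [['-']]) ++ [pvLstrip (pvLstrip p ['-']) ['0']])
                ('-' :: pvLstrip (pvLstrip p ['-']) ['0']) (by simp)
                (by rw [List.getLast_concat]; exact hbne)
                (Or.inr (by rw [List.getLast_concat])) hps]
          simp [pvEmit, htok, pvSep, List.flatten_append, List.append_assoc]
        · by_cases hd : (PySem.List.pyGetD (pvLstrip (pvLstrip p ['-']) ['0']) 0 ' ' == '.') = true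
          · -- dot-leading
            have htok : pvToken p = (PvKind.dot, pvLstrip (pvLstrip p ['-']) ['0']) := by
              simp [pvToken, ha, hb, hn, hd]
            have hAg : PySem.Chars.isIn ['.'] (PySem.List.pyGetD R (-1) [])
                = PySem.Chars.isIn ['.'] prev := by
              rw [PySem.List.pyGetD_neg_one R [] hR]
              exact pvDotAgree (R.getLast hR) prev hprev
            simp only [pvStepA, hRE, Bool.false_eq_true, if_false, ha, hb, hn, hd, if_true, hAg]
            by_cases hc : PySem.Chars.isIn ['.'] prev = true
            · simp only [hc, if_true]
              rw [ih (R ++ [pvLstrip (pvLstrip p ['-']) ['0']])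
                    (pvLstrip (pvLstrip p ['-']) ['0']) (by simp)
                    (by rw [List.getLast_concat]; exact hbne)
                    (Or.inl (List.getLast_concat).symm) hps]
              simp [pvEmit, htok, pvSep, hc, List.flatten_append, List.append_assoc]
            · simp only [hc, Bool.false_eq_true, if_false]
              rw [ih ((R ++ [[' ']]) ++ [pvLstrip (pvLstrip p ['-']) ['0']])
                    (pvLstrip (pvLstrip p ['-']) ['0']) (by simp)
                    (by rw [List.getLast_concat]; exact hbne)
                    (Or.inl (List.getLast_concat).symm) hps]
              simp [pvEmit, htok, pvSep, hc, List.flatten_append, List.append_assoc]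
          · -- digit-leading number
            have htok : pvToken p = (PvKind.num, pvLstrip (pvLstrip p ['-']) ['0']) := by
              simp [pvToken, ha, hb, hn, hd]
            have hAg : PySem.Set.contains pvDigits
                  (PySem.List.pyGetD (PySem.List.pyGetD R (-1) []) (-1) ' ')
                = PySem.Chars.isIn (PySem.List.slice prev (some (-1)) none)
                    ['0','1','2','3','4','5','6','7','8','9'] := by
              rw [PySem.List.pyGetD_neg_one R [] hR]
              exact pvDigitAgree (R.getLast hR) prev hlast hprev
            simp only [pvStepA, hRE, Bool.false_eq_true, if_false, ha, hb, hn, hd, hAg]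
            by_cases hc : PySem.Chars.isIn (PySem.List.slice prev (some (-1)) none)
                ['0','1','2','3','4','5','6','7','8','9'] = true
            · simp only [hc, if_true]
              rw [ih ((R ++ [[' ']]) ++ [pvLstrip (pvLstrip p ['-']) ['0']])
                    (pvLstrip (pvLstrip p ['-']) ['0']) (by simp)
                    (by rw [List.getLast_concat]; exact hbne)
                    (Or.inl (List.getLast_concat).symm) hps]
              simp [pvEmit, htok, pvSep, hc, List.flatten_append, List.append_assoc]
            · simp only [hc, Bool.false_eq_true, if_false]
              rw [ih (R ++ [pvLstrip (pvLstrip p ['-']) ['0']])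
                    (pvLstrip (pvLstrip p ['-']) ['0']) (by simp)
                    (by rw [List.getLast_concat]; exact hbne)
                    (Or.inl (List.getLast_concat).symm) hps]
              simp [pvEmit, htok, pvSep, hc, List.flatten_append, List.append_assoc]


-- the first loop iteration: prev is the verbatim first part, which may be empty only when
-- no digit test against it is reached (Pre_)
lemma pvHead (q : List Char) (qs : List (List Char)) (p0 : List Char)
    (hq : q ≠ []) (hqs : ∀ r ∈ qs, r ≠ []) (hsafe : p0 = [] → pvNumLead q = false) :
    ((q :: qs).foldl pvStepA [p0]).flatten = p0 ++ pvEmit p0 (q :: qs) := by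
  by_cases hp0 : p0 = []
  · subst hp0
    rw [List.foldl_cons]
    have hRE : ([([] : List Char)]).isEmpty = false := rfl
    by_cases ha : PySem.Chars.strIsalpha q = true
    · have htok : pvToken q = (PvKind.cmd, q) := by simp [pvToken, ha]
      have hstep : pvStepA [[]] q = [([] : List Char)] ++ [q] := by simp [pvStepA, hRE, ha]
      rw [hstep, pvMain qs ([([] : List Char)] ++ [q]) q (by simp)
            (by rw [List.getLast_concat]; exact hq)
            (Or.inl (List.getLast_concat).symm) hqs]
      simp [pvEmit, htok, pvSep]
    · by_cases hb : (pvLstrip (pvLstrip q ['-']) ['0']).isEmpty = true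
      · exfalso
        have hnl := hsafe rfl
        simp [pvNumLead, ha, hb] at hnl
      · have hbne : pvLstrip (pvLstrip q ['-']) ['0'] ≠ [] := fun e => hb (by simp [e])
        by_cases hn : (PySem.List.pyGetD q 0 ' ' == '-') = true
        · -- negative
          have htok : pvToken q = (PvKind.neg, '-' :: pvLstrip (pvLstrip q ['-']) ['0']) := by
            simp [pvToken, ha, hb, hn]
          have hstep : pvStepA [[]] q
              = (([([] : List Char)]) ++ [['-']]) ++ [pvLstrip (pvLstrip q ['-']) ['0']] := by
            simp [pvStepA, hRE, ha, hb, hn]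
          rw [hstep, pvMain qs ((([([] : List Char)]) ++ [['-']]) ++ [pvLstrip (pvLstrip q ['-']) ['0']])
                ('-' :: pvLstrip (pvLstrip q ['-']) ['0']) (by simp)
                (by rw [List.getLast_concat]; exact hbne)
                (Or.inr (by rw [List.getLast_concat])) hqs]
          simp [pvEmit, htok, pvSep]
        · by_cases hd : (PySem.List.pyGetD (pvLstrip (pvLstrip q ['-']) ['0']) 0 ' ' == '.') = true
          · -- dot-leading: "." is not in the empty previous token, so a space is emitted
            have htok : pvToken q = (PvKind.dot, pvLstrip (pvLstrip q ['-']) ['0']) := by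
              simp [pvToken, ha, hb, hn, hd]
            have hdotprev : PySem.Chars.isIn ['.'] (PySem.List.pyGetD [([] : List Char)] (-1) [])
                = false := by decide
            have hstep : pvStepA [[]] q
                = (([([] : List Char)]) ++ [[' ']]) ++ [pvLstrip (pvLstrip q ['-']) ['0']] := by
              simp [pvStepA, hRE, ha, hb, hn, hd, hdotprev]
            rw [hstep, pvMain qs ((([([] : List Char)]) ++ [[' ']]) ++ [pvLstrip (pvLstrip q ['-']) ['0']])
                  (pvLstrip (pvLstrip q ['-']) ['0']) (by simp)
                  (by rw [List.getLast_concat]; exact hbne)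
                  (Or.inl (List.getLast_concat).symm) hqs]
            have hdotp : PySem.Chars.isIn ['.'] ([] : List Char) = false := by decide
            simp [pvEmit, htok, pvSep, hdotp]
          · -- digit-leading number cannot follow the empty first part (Pre_)
            exfalso
            have h1 : PySem.List.pyGetD q 0 ' ' = q.headD ' ' := by
              cases q with
              | nil => exact absurd rfl hq
              | cons a l => simp [PySem.List.pyGetD_zero_cons]
            have h2 : PySem.List.pyGetD (pvLstrip (pvLstrip q ['-']) ['0']) 0 ' '
                = (pvLstrip (pvLstrip q ['-']) ['0']).headD ' ' := by
              cases hB : pvLstrip (pvLstrip q ['-']) ['0'] with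
              | nil => exact absurd hB hbne
              | cons a l => simp [PySem.List.pyGetD_zero_cons]
            have hnl := hsafe rfl
            simp only [pvNumLead, ← h1, ← h2] at hnl
            simp at hn hd
            simp [ha, hb, hn, hd] at hnl
  · have hm := pvMain (q :: qs) [p0] p0 (by simp) (by simpa using hp0) (Or.inl rfl)
      (by intro r hr; rcases List.mem_cons.mp hr with rfl | hr
          · exact hq
          · exact hqs r hr)
    simpa using hm

-- ===== VERDICT (by name: the statement is the Claim_ definition above) =====
theorem compact_path_spec : Claim_equal_compact_path := by
  intro path _ hpre
  obtain ⟨hpre1, hpre2⟩ := hpre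
  unfold Spec_compact_path
  cases path with
  | nil => rfl
  | cons s ss =>
    cases ss with
    | nil =>
      unfold compact_path compact_path_alt
      simp [pvStepA]
    | cons t ts =>
      have hemp : ("" : String).toList = [] := by simp
      have ht : t ≠ "" := fun e => hpre1 (by simp [e])
      have htl : t.toList ≠ [] := fun e => ht (String.toList_inj.mp (e.trans hemp.symm))
      have hts : ∀ r ∈ ts.map String.toList, r ≠ [] := by
        intro r hr e
        obtain ⟨u, hu, rfl⟩ := List.mem_map.mp hr
        exact hpre1
          (List.mem_cons_of_mem _ ((String.toList_inj.mp (e.trans hemp.symm)) ▸ hu))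
      have hsafe : s.toList = [] → pvNumLead t.toList = false := by
        intro e
        have hs0 : s = "" := String.toList_inj.mp (e.trans hemp.symm)
        simpa using hpre2 (by simpa using hs0)
      have h0 : pvStepA [] s.toList = [s.toList] := by simp [pvStepA]
      unfold compact_path compact_path_alt
      simp only [List.map_cons]
      rw [List.foldl_cons, h0]
      rw [pvJoinNil, pvJoinNil,
          pvHead t.toList (ts.map String.toList) s.toList htl hts hsafe,
          show pvToken t.toList :: ts.map (fun q => pvToken q.toList)
              = (t.toList :: ts.map String.toList).map pvToken by
            simp [List.map_map, Function.comp],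
          List.tail_cons,
          pvZipEmit (t.toList :: ts.map String.toList) PvKind.cmd s.toList]
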